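-- pv_equiv track=rewrite | github.com/buyaoxiangtale/LabUtopia | roomlayout/12_17/nav_goal_targets_demo_12_17.py | pick_platform
-- ===== SOURCE A (Python) =====
-- def _norm(s: str) -> str:
--     """规范化字符串：去除下划线/空格/横线，转小写"""
--     return s.lower().replace(" ", "").replace("-", "").replace("_", "")
--
-- def pick_platform(location, room_assets, location_mapping):
--     """
--     根据 location 选择对应的平台对象。
--     使用 location_mapping 进行映射，通过规范化匹配在 room_assets 中查找。
--     """
--     target_id = location_mapping.get(location)
--     if not target_id:
--         # 尝试直接规范化匹配
--         target_id = location
--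
--     objs = room_assets.get("objects", [])
--     norm_target = _norm(target_id)
--
--     for obj in objs:
--         obj_id = obj.get("id", "")
--         if _norm(obj_id) == norm_target:
--             return obj
--
--     # 模糊匹配
--     for obj in objs:
--         obj_id = obj.get("id", "")
--         if _norm(obj_id).startswith(norm_target) or norm_target.startswith(_norm(obj_id)):
--             return obj
--
--     return None
-- ===== SOURCE B (Python) =====
-- def _norm(s: str) -> str:
--     return s.lower().replace(" ", "").replace("-", "").replace("_", "")
--
-- def pick_platform(location, room_assets, location_mapping):
--     norm_target = _norm(location_mapping.get(location) or location)
--     fallback = None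
--     for obj in room_assets.get("objects", []):
--         n = _norm(obj.get("id", ""))
--         if n == norm_target:
--             return obj
--         if fallback is None and (n.startswith(norm_target) or norm_target.startswith(n)):
--             fallback = obj
--     return fallback
-- ===== Notes on version B (the rewrite author's own statement) =====
-- stated objective: simpler
-- what changed: Replaces A's two full passes over the objects (one for exact, one for fuzzy matches) with a single pass that returns on an exact match and remembers the first fuzzy candidate as a fallback, normalizing each id once instead of twice.
import Mathlib
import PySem

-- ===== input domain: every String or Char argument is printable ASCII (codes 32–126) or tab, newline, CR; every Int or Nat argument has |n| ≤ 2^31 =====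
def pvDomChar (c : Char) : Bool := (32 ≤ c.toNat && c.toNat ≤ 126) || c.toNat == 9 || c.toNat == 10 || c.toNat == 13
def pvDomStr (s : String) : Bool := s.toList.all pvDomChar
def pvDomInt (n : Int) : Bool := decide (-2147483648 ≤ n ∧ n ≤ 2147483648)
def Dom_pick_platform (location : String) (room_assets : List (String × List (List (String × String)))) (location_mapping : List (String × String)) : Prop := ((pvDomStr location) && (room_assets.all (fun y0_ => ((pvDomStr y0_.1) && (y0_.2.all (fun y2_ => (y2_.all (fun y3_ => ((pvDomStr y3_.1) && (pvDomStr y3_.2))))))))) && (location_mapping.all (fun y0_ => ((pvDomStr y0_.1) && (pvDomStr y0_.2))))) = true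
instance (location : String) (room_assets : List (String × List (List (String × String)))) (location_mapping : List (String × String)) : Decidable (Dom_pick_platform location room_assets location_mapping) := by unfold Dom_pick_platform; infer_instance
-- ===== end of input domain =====

-- B replaces A's two full passes over the objects (exact pass, then fuzzy pass) with a single
-- pass that returns on an exact match and keeps the first fuzzy candidate as a fallback (simpler).


-- ===== PORT A =====
-- _norm: lower, then strip " ", "-", "_"
def pyNorm (s : String) : String :=
  PySem.Str.replace (PySem.Str.replace (PySem.Str.replace (PySem.Str.lower s) " " "") "-" "") "_" ""

-- A's first loop: first object whose normalized id equals the target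
def pickLoopExact (nt : String) : List (List (String × String)) → Option (List (String × String))
  | [] => none
  | obj :: rest =>
    if pyNorm ((PySem.Dict.mk obj).getD "id" "") = nt then some obj
    else pickLoopExact nt rest

-- A's second loop: first object whose normalized id is a prefix of / extended by the target
def pickLoopFuzzy (nt : String) : List (List (String × String)) → Option (List (String × String))
  | [] => none
  | obj :: rest =>
    let n := pyNorm ((PySem.Dict.mk obj).getD "id" "")
    if PySem.Str.startswith n nt || PySem.Str.startswith nt n then some obj
    else pickLoopFuzzy nt rest

def pick_platform (location : String) (room_assets : List (String × List (List (String × String)))) (location_mapping : List (String × String)) : Option (List (String × String)) :=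
  let target_id :=
    match (PySem.Dict.mk location_mapping).get? location with
    | none => location
    | some s => if s = "" then location else s   -- `if not target_id:` — falsy None or ""
  let objs := (PySem.Dict.mk room_assets).getD "objects" []
  let norm_target := pyNorm target_id
  match pickLoopExact norm_target objs with
  | some obj => some obj
  | none => pickLoopFuzzy norm_target objs

-- ===== PORT B =====
-- B's single loop: return on exact match, remember the first fuzzy candidate
def pickScan (nt : String) (fallback : Option (List (String × String))) : List (List (String × String)) → Option (List (String × String))
  | [] => fallback
  | obj :: rest =>
    let n := pyNorm ((PySem.Dict.mk obj).getD "id" "")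
    if n = nt then some obj
    else pickScan nt
      (if fallback.isNone && (PySem.Str.startswith n nt || PySem.Str.startswith nt n)
       then some obj else fallback) rest

def pick_platform_alt (location : String) (room_assets : List (String × List (List (String × String)))) (location_mapping : List (String × String)) : Option (List (String × String)) :=
  let norm_target := pyNorm
    (match (PySem.Dict.mk location_mapping).get? location with
     | none => location
     | some s => if s = "" then location else s)   -- `location_mapping.get(location) or location`
  pickScan norm_target none ((PySem.Dict.mk room_assets).getD "objects" [])

-- ===== PRECONDITION & SPEC =====
def Spec_pick_platform (location : String) (room_assets : List (String × List (List (String × String)))) (location_mapping : List (String × String)) (out : Option (List (String × String))) : Prop := out = pick_platform_alt location room_assets location_mapping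
instance (location : String) (room_assets : List (String × List (List (String × String)))) (location_mapping : List (String × String)) (out : Option (List (String × String))) : Decidable (Spec_pick_platform location room_assets location_mapping out) := by unfold Spec_pick_platform; infer_instance

-- ===== CLAIM (what is proved, stated in full; the proofs are below) =====
def Claim_equal_pick_platform : Prop := ∀ (location : String) (room_assets : List (String × List (List (String × String)))) (location_mapping : List (String × String)), Dom_pick_platform location room_assets location_mapping → Spec_pick_platform location room_assets location_mapping (pick_platform location room_assets location_mapping)

-- ===== LEMMAS AND PROOFS =====
-- B's one-pass scan equals: A's exact loop, else the carried fallback, else A's fuzzy loop.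
lemma pickScan_eq (nt : String) (objs : List (List (String × String)))
    (fb : Option (List (String × String))) :
    pickScan nt fb objs =
      match pickLoopExact nt objs with
      | some o => some o
      | none => fb.or (pickLoopFuzzy nt objs) := by
  induction objs generalizing fb with
  | nil => cases fb <;> simp [pickScan, pickLoopExact, pickLoopFuzzy]
  | cons obj rest ih =>
    by_cases h : pyNorm ((PySem.Dict.mk obj).getD "id" "") = nt
    · simp [pickScan, pickLoopExact, h]
    · cases fb with
      | some f => simp [pickScan, pickLoopExact, h, ih, Option.or]
      | none =>
        simp only [pickScan, pickLoopExact, pickLoopFuzzy, h, Option.isNone_none,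
          Bool.true_and, ih, Option.or]
        cases hE : pickLoopExact nt rest <;> split_ifs <;> simp

-- ===== VERDICT (by name: the statement is the Claim_ definition above) =====
theorem pick_platform_spec : Claim_equal_pick_platform := by
  intro location room_assets location_mapping _
  unfold Spec_pick_platform pick_platform pick_platform_alt
  rw [pickScan_eq]
  simp only [Option.none_or]
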